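-- pv_equiv track=rewrite | github.com/marklove5102/Vortice.Windows | final_converter.py | _split_generic_args
-- ===== SOURCE A (Python) =====
-- from typing import Dict, List, Set, Tuple, Optional
--
-- def _split_generic_args(args_str: str) -> List[str]:
--     """Split generic type arguments respecting nested generics"""
--     result = []
--     depth = 0
--     current = ''
--
--     for char in args_str:
--         if char == '<':
--             depth += 1
--             current += char
--         elif char == '>':
--             depth -= 1
--             current += char
--         elif char == ',' and depth == 0:
--             if current.strip():
--                 result.append(current.strip())
--             current = ''
--         else:
--             current += char
--
--     if current.strip():
--         result.append(current.strip())
--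
--     return result
-- ===== SOURCE B (Python) =====
-- from typing import List
--
-- def _split_generic_args(args_str: str) -> List[str]:
--     """Split generic type arguments respecting nested generics.
--
--     Two-phase structure: find the first top-level comma, slice off the piece
--     before it, and continue on the remainder; no running character buffer."""
--
--     def _first_cut(s: str):
--         depth = 0
--         for i, ch in enumerate(s):
--             if ch == '<':
--                 depth += 1
--             elif ch == '>':
--                 depth -= 1
--             elif ch == ',' and depth == 0:
--                 return i
--         return None
--
--     parts = []
--     rest = args_str
--     while True:
--         i = _first_cut(rest)
--         if i is None:
--             break
--         piece = rest[:i].strip()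
--         if piece:
--             parts.append(piece)
--         rest = rest[i + 1:]
--     tail = rest.strip()
--     if tail:
--         parts.append(tail)
--     return parts
-- ===== Notes on version B (the rewrite author's own statement) =====
-- stated objective: alternative
-- what changed: Replaces A's single scan with a running character buffer by a cut-and-recurse decomposition: a helper finds the index of the first top-level comma, the piece before it is sliced out and stripped, and the loop continues on the remainder.
import Mathlib
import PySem

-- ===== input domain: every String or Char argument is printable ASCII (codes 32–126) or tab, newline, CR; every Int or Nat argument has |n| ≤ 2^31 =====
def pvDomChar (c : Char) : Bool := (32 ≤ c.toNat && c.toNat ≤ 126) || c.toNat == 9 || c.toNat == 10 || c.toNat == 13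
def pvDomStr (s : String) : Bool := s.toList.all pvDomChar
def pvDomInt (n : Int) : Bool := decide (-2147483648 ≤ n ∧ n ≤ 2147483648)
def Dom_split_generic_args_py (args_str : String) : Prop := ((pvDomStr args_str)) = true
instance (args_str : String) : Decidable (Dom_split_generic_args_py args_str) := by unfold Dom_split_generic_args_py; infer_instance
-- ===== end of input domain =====

-- B replaces A's buffer-carrying scan by a cut-and-slice decomposition (find first
-- top-level comma, slice, continue on the remainder); same cost, alternative structure.

-- ===== PORT A =====
-- A's for-loop over the characters, with state (result, depth, current buffer).
def splitGoA : List Char → List (List Char) → Int → List Char → List (List Char)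
  | [], result, _depth, current =>
      result ++ (if PySem.Chars.strip current ≠ [] then [PySem.Chars.strip current] else [])
  | c :: t, result, depth, current =>
      if c = '<' then splitGoA t result (depth + 1) (current ++ [c])
      else if c = '>' then splitGoA t result (depth - 1) (current ++ [c])
      else if c = ',' ∧ depth = 0 then
        splitGoA t (result ++ (if PySem.Chars.strip current ≠ [] then [PySem.Chars.strip current] else [])) depth []
      else splitGoA t result depth (current ++ [c])

def split_generic_args_py (args_str : String) : List String :=
  (splitGoA args_str.toList [] 0 []).map String.ofList

-- ===== PORT B =====
-- B's helper _first_cut: index of the first comma at depth 0, or none.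
def splitFirstCut : List Char → Int → Option Nat
  | [], _ => none
  | c :: t, depth =>
      if c = '<' then (splitFirstCut t (depth + 1)).map (· + 1)
      else if c = '>' then (splitFirstCut t (depth - 1)).map (· + 1)
      else if c = ',' ∧ depth = 0 then some 0
      else (splitFirstCut t depth).map (· + 1)

lemma splitFirstCut_ne_nil {s : List Char} {d : Int} {i : Nat}
    (h : splitFirstCut s d = some i) : s ≠ [] := by
  intro hs; subst hs; simp [splitFirstCut] at h

-- B's while loop: cut off the piece before the first top-level comma and continue.
-- rest[:i] / rest[i+1:] with 0 ≤ i < len are exactly take i / drop (i+1).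
def splitBLoop (rest : List Char) : List (List Char) :=
  match h : splitFirstCut rest 0 with
  | none =>
      if PySem.Chars.strip rest ≠ [] then [PySem.Chars.strip rest] else []
  | some i =>
      (if PySem.Chars.strip (rest.take i) ≠ [] then [PySem.Chars.strip (rest.take i)] else [])
        ++ splitBLoop (rest.drop (i + 1))
termination_by rest.length
decreasing_by
  have := splitFirstCut_ne_nil h
  have : 0 < rest.length := List.length_pos_iff.mpr this
  simpa using by omega

def split_generic_args_py_alt (args_str : String) : List String :=
  (splitBLoop args_str.toList).map String.ofList

-- ===== PRECONDITION & SPEC =====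
def Spec_split_generic_args_py (args_str : String) (out : List String) : Prop := out = split_generic_args_py_alt args_str
instance (args_str : String) (out : List String) : Decidable (Spec_split_generic_args_py args_str out) := by unfold Spec_split_generic_args_py; infer_instance

-- ===== CLAIM (what is proved, stated in full; the proofs are below) =====
def Claim_equal_split_generic_args_py : Prop := ∀ (args_str : String), Dom_split_generic_args_py args_str → Spec_split_generic_args_py args_str (split_generic_args_py args_str)

-- ===== LEMMAS AND PROOFS =====

-- net bracket depth of a prefix already scanned
def netDepth : List Char → Int
  | [] => 0
  | c :: t => (if c = '<' then 1 else if c = '>' then -1 else 0) + netDepth t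

lemma netDepth_append (a b : List Char) : netDepth (a ++ b) = netDepth a + netDepth b := by
  induction a with
  | nil => simp [netDepth]
  | cons c t ih => simp [netDepth, ih]; ring

lemma splitFirstCut_append (a b : List Char) (d : Int) :
    splitFirstCut (a ++ b) d =
      match splitFirstCut a d with
      | some i => some i
      | none => (splitFirstCut b (d + netDepth a)).map (· + a.length) := by
  induction a generalizing d with
  | nil => simp [splitFirstCut, netDepth]
  | cons c t ih =>
      by_cases h1 : c = '<'
      · simp only [List.cons_append, splitFirstCut, h1, if_pos rfl, ih]
        cases splitFirstCut t (d + 1) <;>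
          simp [netDepth, h1, Option.map_map, Function.comp] <;> ring_nf <;>
            congr 1 <;> funext x <;> omega
      · by_cases h2 : c = '>'
        · simp only [List.cons_append, splitFirstCut, h1, h2, if_neg h1, if_pos rfl, ih]
          cases splitFirstCut t (d - 1) <;>
            simp [netDepth, h1, h2, Option.map_map, Function.comp] <;> ring_nf <;>
              congr 1 <;> funext x <;> omega
        · by_cases h3 : c = ',' ∧ d = 0
          · simp [splitFirstCut, h1, h2, h3]
          · simp only [List.cons_append, splitFirstCut, if_neg h1, if_neg h2, if_neg h3, ih]
            cases splitFirstCut t d <;>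
              simp [netDepth, h1, h2, Option.map_map, Function.comp] <;> ring_nf <;>
                congr 1 <;> funext x <;> omega

lemma splitBLoop_none {s : List Char} (h : splitFirstCut s 0 = none) :
    splitBLoop s = if PySem.Chars.strip s ≠ [] then [PySem.Chars.strip s] else [] := by
  rw [splitBLoop]; split <;> simp_all

lemma splitBLoop_some {s : List Char} {i : Nat} (h : splitFirstCut s 0 = some i) :
    splitBLoop s =
      (if PySem.Chars.strip (s.take i) ≠ [] then [PySem.Chars.strip (s.take i)] else [])
        ++ splitBLoop (s.drop (i + 1)) := by
  rw [splitBLoop]; split <;> simp_all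

lemma splitGoA_eq (l : List Char) :
    ∀ (res : List (List Char)) (cur : List Char), splitFirstCut cur 0 = none →
      splitGoA l res (netDepth cur) cur = res ++ splitBLoop (cur ++ l) := by
  induction l with
  | nil =>
      intro res cur hcur
      simp [splitGoA, splitBLoop_none hcur]
  | cons c t ih =>
      intro res cur hcur
      have hext : ∀ c' : Char, ¬ (c' = ',' ∧ (0 : Int) + netDepth cur = 0) →
          splitFirstCut (cur ++ [c']) 0 = none := by
        intro c' hc'
        rw [splitFirstCut_append, hcur]
        by_cases h1 : c' = '<' <;> by_cases h2 : c' = '>' <;>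
          simp_all [splitFirstCut]
      by_cases h1 : c = '<'
      · have hnd : netDepth (cur ++ [c]) = netDepth cur + 1 := by
          simp [netDepth_append, netDepth, h1]
        have := ih res (cur ++ [c]) (hext c (by simp [h1]))
        rw [hnd] at this
        simpa [splitGoA, h1, List.append_assoc] using this
      · by_cases h2 : c = '>'
        · have hnd : netDepth (cur ++ [c]) = netDepth cur - 1 := by
            simp [netDepth_append, netDepth, h1, h2]; ring
          have := ih res (cur ++ [c]) (hext c (by simp [h1, h2]))
          rw [hnd] at this
          simpa [splitGoA, h1, h2, List.append_assoc] using this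
        · by_cases h3 : c = ',' ∧ netDepth cur = 0
          · -- top-level comma: B cuts at index cur.length
            have hcut : splitFirstCut (cur ++ c :: t) 0 = some cur.length := by
              rw [splitFirstCut_append, hcur]
              simp [splitFirstCut, h3.1, h3.2]
            have hb := splitBLoop_some hcut
            have htake : (cur ++ c :: t).take cur.length = cur := by
              simp
            have hdrop : (cur ++ c :: t).drop (cur.length + 1) = t := by
              rw [show cur.length + 1 = (cur ++ [c]).length by simp]
              rw [show cur ++ c :: t = (cur ++ [c]) ++ t by simp]
              simp
            rw [hb, htake, hdrop]
            have := ih (res ++ (if PySem.Chars.strip cur ≠ [] then [PySem.Chars.strip cur] else [])) [] (by simp [splitFirstCut])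
            simp only [netDepth, List.nil_append] at this
            have hA : splitGoA (c :: t) res (netDepth cur) cur
                = splitGoA t (res ++ (if PySem.Chars.strip cur ≠ [] then [PySem.Chars.strip cur] else [])) (netDepth cur) [] := by
              rw [splitGoA, if_neg h1, if_neg h2, if_pos ⟨h3.1, h3.2⟩]
            rw [hA, h3.2, this, List.append_assoc]
          · have hnd : netDepth (cur ++ [c]) = netDepth cur := by
              have hc1 : c ≠ '<' := h1
              have hc2 : c ≠ '>' := h2
              simp [netDepth_append, netDepth, hc1, hc2]
            have := ih res (cur ++ [c]) (hext c (by intro hh; exact h3 ⟨hh.1, by omega⟩))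
            rw [hnd] at this
            have hsplit : splitGoA (c :: t) res (netDepth cur) cur
                = splitGoA t res (netDepth cur) (cur ++ [c]) := by
              rw [splitGoA]
              rw [if_neg h1, if_neg h2, if_neg (by intro hh; exact h3 hh)]
            rw [hsplit, this, List.append_assoc]; rfl

-- ===== VERDICT (by name: the statement is the Claim_ definition above) =====
theorem split_generic_args_py_spec : Claim_equal_split_generic_args_py := by
  intro s _
  unfold Spec_split_generic_args_py split_generic_args_py split_generic_args_py_alt
  have := splitGoA_eq s.toList [] [] (by simp [splitFirstCut])
  simp only [netDepth] at this
  rw [this]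
  simp
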